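-- pv_equiv track=rewrite | github.com/future-jj/sck | test.py | find_modes
-- ===== SOURCE A (Python) =====
-- def find_modes(nums):
--     if not nums:
--         return []
--     counts = {}
--     first_occurrence = {}
--     for idx, num in enumerate(nums):
--         if num not in counts:
--             counts[num] = 1
--             first_occurrence[num] = idx
--         else:
--             counts[num] += 1
--     max_count = max(counts.values())
--     candidates = [num for num, cnt in counts.items() if cnt == max_count]
--     candidates.sort(key= lambda x: first_occurrence[x])
--     return candidates;
-- ===== SOURCE B (Python) =====
-- def find_modes(nums):
--     if not nums:
--         return []
--     counts = {}
--     for num in nums: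
--         counts[num] = counts.get(num, 0) + 1
--     max_count = max(counts.values())
--     result = []
--     seen = set()
--     for num in nums:
--         if num not in seen:
--             seen.add(num)
--             if counts[num] == max_count:
--                 result.append(num)
--     return result
-- ===== Notes on version B (the rewrite author's own statement) =====
-- stated objective: simpler
-- what changed: Drops the first_occurrence dict and the candidate sort entirely: B counts in one pass, then makes a second ordered pass over nums with a seen set, emitting each value with maximal count the first time it appears, so the output is in first-occurrence order by construction.
import Mathlib
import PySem

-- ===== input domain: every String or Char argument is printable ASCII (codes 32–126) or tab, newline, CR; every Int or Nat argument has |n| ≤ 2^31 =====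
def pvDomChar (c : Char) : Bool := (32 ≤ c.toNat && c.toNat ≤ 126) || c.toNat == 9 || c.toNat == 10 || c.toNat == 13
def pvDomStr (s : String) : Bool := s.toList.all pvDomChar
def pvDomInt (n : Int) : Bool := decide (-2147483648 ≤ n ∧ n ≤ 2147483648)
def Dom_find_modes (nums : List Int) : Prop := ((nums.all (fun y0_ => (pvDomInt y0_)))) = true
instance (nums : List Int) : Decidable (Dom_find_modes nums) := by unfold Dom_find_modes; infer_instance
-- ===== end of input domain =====

-- B drops A's first_occurrence dict and candidate sort: it counts in one pass, then rescans
-- nums in order with a seen set, emitting first occurrences of maximal-count values (objective: simpler).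


-- ===== PORT A =====
def find_modes (nums : List Int) : List Int :=
  if nums = [] then []
  else
    -- one loop over enumerate(nums) carrying the pair (counts, first_occurrence)
    let st := (PySem.List.enumerate nums 0).foldl
      (fun (s : PySem.Dict Int Int × PySem.Dict Int Int) (p : Int × Int) =>
        if s.1.contains p.2 = false then (s.1.insert p.2 1, s.2.insert p.2 p.1)
        else (s.1.modify p.2 0 (· + 1), s.2))
      (PySem.Dict.empty, PySem.Dict.empty)
    let counts := st.1
    let first_occurrence := st.2
    -- max(counts.values()): counts is nonempty here (nums ≠ []), so the .getD 0 default is never used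
    let max_count := (PySem.List.max? counts.values (fun v => v)).getD 0
    let candidates := (counts.items.filter (fun p => p.2 == max_count)).map (·.1)
    -- candidates.sort(key=lambda x: first_occurrence[x]); every candidate is a key, so getD's default is never used
    PySem.List.sorted candidates (fun x => first_occurrence.getD x 0) false

-- ===== PORT B =====
def find_modes_alt (nums : List Int) : List Int :=
  if nums = [] then []
  else
    let counts := nums.foldl (fun (d : PySem.Dict Int Int) n => d.insert n (d.getD n 0 + 1)) PySem.Dict.empty
    -- counts is nonempty here (nums ≠ []), so the .getD 0 default is never used
    let max_count := (PySem.List.max? counts.values (fun v => v)).getD 0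
    let st := nums.foldl
      (fun (s : List Int × PySem.Set Int) n =>
        if PySem.Set.contains s.2 n then s
        else ((if counts.getD n 0 == max_count then s.1 ++ [n] else s.1), PySem.Set.add s.2 n))
      ([], PySem.Set.empty)
    st.1

-- ===== PRECONDITION & SPEC =====
def Spec_find_modes (nums : List Int) (out : List Int) : Prop := out = find_modes_alt nums
instance (nums : List Int) (out : List Int) : Decidable (Spec_find_modes nums out) := by unfold Spec_find_modes; infer_instance

-- ===== CLAIM (what is proved, stated in full; the proofs are below) =====
def Claim_equal_find_modes : Prop := ∀ (nums : List Int), Dom_find_modes nums → Spec_find_modes nums (find_modes nums)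

-- ===== LEMMAS AND PROOFS =====

-- A's conditional counting step is exactly the Counter step.
theorem insert_one_eq_modify (d : PySem.Dict Int Int) (k : Int) (h : d.contains k = false) :
    d.insert k 1 = d.modify k 0 (· + 1) := by
  simp only [PySem.Dict.modify, PySem.Dict.getD_of_not_contains d 0 h]
  norm_num

theorem contains_true_of_not_false (b : Bool) (h : ¬ b = false) : b = true := by
  cases b <;> simp_all

-- First projection of A's paired loop: the counts dict is the Counter fold continued from c.
theorem fstA (l : List (Int × Int)) (c f : PySem.Dict Int Int) :
    (l.foldl
      (fun (s : PySem.Dict Int Int × PySem.Dict Int Int) (p : Int × Int) =>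
        if s.1.contains p.2 = false then (s.1.insert p.2 1, s.2.insert p.2 p.1)
        else (s.1.modify p.2 0 (· + 1), s.2)) (c, f)).1
    = (l.map (·.2)).foldl (fun d x => d.modify x 0 (· + 1)) c := by
  induction l generalizing c f with
  | nil => rfl
  | cons p t ih =>
    by_cases h : c.contains p.2 = false
    · simp only [List.foldl_cons, List.map_cons, if_pos h, ih, insert_one_eq_modify c p.2 h]
    · simp only [List.foldl_cons, List.map_cons, if_neg h, ih]

-- Invariant of A's paired loop: first_occurrence has the same keys as counts, the keys are
-- distinct, and its stored indices strictly increase in insertion order.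
theorem sndA_inv (l : List Int) : ∀ (s : Int) (c f : PySem.Dict Int Int),
    c.keys = f.keys → f.keys.Nodup →
    f.items.Pairwise (fun a b => a.2 < b.2) → (∀ q ∈ f.items, q.2 < s) →
    (((PySem.List.enumerate l s).foldl
      (fun (s : PySem.Dict Int Int × PySem.Dict Int Int) (p : Int × Int) =>
        if s.1.contains p.2 = false then (s.1.insert p.2 1, s.2.insert p.2 p.1)
        else (s.1.modify p.2 0 (· + 1), s.2)) (c, f)).1.keys
      = ((PySem.List.enumerate l s).foldl
      (fun (s : PySem.Dict Int Int × PySem.Dict Int Int) (p : Int × Int) =>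
        if s.1.contains p.2 = false then (s.1.insert p.2 1, s.2.insert p.2 p.1)
        else (s.1.modify p.2 0 (· + 1), s.2)) (c, f)).2.keys)
    ∧ ((PySem.List.enumerate l s).foldl
      (fun (s : PySem.Dict Int Int × PySem.Dict Int Int) (p : Int × Int) =>
        if s.1.contains p.2 = false then (s.1.insert p.2 1, s.2.insert p.2 p.1)
        else (s.1.modify p.2 0 (· + 1), s.2)) (c, f)).2.items.Pairwise (fun a b => a.2 < b.2) := by
  induction l with
  | nil => intro s c f hk _ hp _; exact ⟨hk, hp⟩
  | cons n t ih =>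
    intro s c f hk hnd hp hb
    rw [PySem.List.enumerate_cons, List.foldl_cons]
    by_cases h : c.contains n = false
    · rw [if_pos h]
      have hfc : f.contains n = false := by
        rw [PySem.Dict.contains_eq_decide_mem_keys, ← hk, ← PySem.Dict.contains_eq_decide_mem_keys]
        exact h
      have hfi : (f.insert n s).items = f.items ++ [(n, s)] :=
        PySem.Dict.items_insert_of_not_contains f s hfc
      refine ih (s + 1) (c.insert n 1) (f.insert n s) ?_ ?_ ?_ ?_
      · rw [PySem.Dict.keys_insert_of_not_contains c 1 h,
            PySem.Dict.keys_insert_of_not_contains f s hfc, hk]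
      · rw [PySem.Dict.keys_insert_of_not_contains f s hfc]
        refine List.nodup_append.mpr ⟨hnd, List.nodup_singleton n, ?_⟩
        intro a ha b hb
        have hb' : b = n := by simpa using hb
        subst hb'
        intro hab; subst hab
        rw [PySem.Dict.contains_eq_decide_mem_keys] at hfc
        simp at hfc; exact hfc ha
      · rw [hfi]
        refine List.pairwise_append.mpr ⟨hp, List.pairwise_singleton _ _, ?_⟩
        intro a ha b hbm
        simp only [List.mem_singleton] at hbm; subst hbm
        exact hb a ha
      · intro q hq
        rw [hfi] at hq
        rcases List.mem_append.mp hq with hq | hq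
        · exact lt_trans (hb q hq) (by omega)
        · simp only [List.mem_singleton] at hq; subst hq; omega
    · rw [if_neg h]
      refine ih (s + 1) (c.modify n 0 (· + 1)) f ?_ hnd hp ?_
      · rw [PySem.Dict.keys_modify,
            PySem.Dict.keys_insert_of_contains c _ (contains_true_of_not_false _ h), hk]
      · intro q hq; exact lt_trans (hb q hq) (by omega)

-- Lookup along a sublist of the keys of such a dict is strictly increasing.
theorem pairwise_getD_of_sublist (f : PySem.Dict Int Int) (hnd : f.keys.Nodup)
    (hp : f.items.Pairwise (fun a b => a.2 < b.2)) (l : List Int) (hl : l.Sublist f.keys) :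
    l.Pairwise (fun a b => f.getD a 0 < f.getD b 0) := by
  refine List.Pairwise.sublist hl ?_
  have h2 : f.items.Pairwise (fun a b => f.getD a.1 0 < f.getD b.1 0) := by
    refine hp.imp_of_mem ?_
    rintro ⟨a1, a2⟩ ⟨b1, b2⟩ ha hb hab
    have ha' : f.getD a1 0 = a2 := PySem.Dict.getD_of_mem_items f ha hnd 0
    have hb' : f.getD b1 0 = b2 := PySem.Dict.getD_of_mem_items f hb hnd 0
    simpa [ha', hb'] using hab
  have := List.Pairwise.map (f := fun p : Int × Int => p.1)
    (S := fun x y => f.getD x 0 < f.getD y 0) (fun _ _ h => h) h2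
  simpa [PySem.Dict.keys] using this

-- Set.add-folds only append: the starting set is a prefix of the result.
theorem foldl_add_prefix (l : List Int) : ∀ (s : PySem.Set Int),
    ∃ u, l.foldl PySem.Set.add s = s ++ u := by
  induction l with
  | nil => intro s; exact ⟨[], by simp⟩
  | cons n t ih =>
    intro s
    by_cases h : PySem.Set.contains s n = true
    · have hadd : PySem.Set.add s n = s := by simp only [PySem.Set.add, h, if_true]
      simpa [hadd] using ih s
    · have h' : PySem.Set.contains s n = false := by cases hb : PySem.Set.contains s n <;> simp_all
      have hadd : PySem.Set.add s n = s ++ [n] := by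
        simp only [PySem.Set.add, h', Bool.false_eq_true, if_false]
      obtain ⟨u, hu⟩ := ih (s ++ [n])
      exact ⟨n :: u, by simp [hadd, hu]⟩

-- B's second pass emits, in order, the not-yet-seen elements satisfying the test.
theorem pass2 (p : Int → Bool) (l : List Int) : ∀ (acc : List Int) (seen : PySem.Set Int),
    (l.foldl
      (fun (s : List Int × PySem.Set Int) n =>
        if PySem.Set.contains s.2 n then s
        else ((if p n then s.1 ++ [n] else s.1), PySem.Set.add s.2 n)) (acc, seen)).1
    = acc ++ ((l.foldl PySem.Set.add seen).drop seen.length).filter p := by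
  induction l with
  | nil => intro acc seen; simp
  | cons n t ih =>
    intro acc seen
    by_cases h : PySem.Set.contains seen n = true
    · have hadd : PySem.Set.add seen n = seen := by simp only [PySem.Set.add, h, if_true]
      simp only [List.foldl_cons, h, if_true, hadd, ih]
    · have h' : PySem.Set.contains seen n = false := by cases hb : PySem.Set.contains seen n <;> simp_all
      have hadd : PySem.Set.add seen n = seen ++ [n] := by
        simp only [PySem.Set.add, h', Bool.false_eq_true, if_false]
      simp only [List.foldl_cons, h', Bool.false_eq_true, if_false, hadd]
      rw [ih]
      obtain ⟨u, hu⟩ := foldl_add_prefix t (seen ++ [n])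
      have hdrop1 : (t.foldl PySem.Set.add (seen ++ [n])).drop seen.length = n :: u := by
        rw [hu, List.append_assoc]; exact List.drop_left' rfl
      have hdrop2 : (t.foldl PySem.Set.add (seen ++ [n])).drop (seen ++ [n]).length = u := by
        rw [hu]; exact List.drop_left' rfl
      rw [hdrop1, hdrop2, List.filter_cons]
      by_cases hp : p n = true
      · simp [hp]
      · simp [Bool.eq_false_iff.mpr hp]

-- ===== VERDICT (by name: the statement is the Claim_ definition above) =====
theorem find_modes_spec : Claim_equal_find_modes := by
  intro nums _
  unfold Spec_find_modes find_modes find_modes_alt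
  by_cases hnil : nums = []
  · simp [hnil]
  · simp only [hnil, if_false]
    have hB : nums.foldl (fun (d : PySem.Dict Int Int) n => d.insert n (d.getD n 0 + 1)) PySem.Dict.empty
        = PySem.Dict.counter nums := PySem.Dict.foldl_insert_getD_add_one_eq_counter nums
    have hfst : ∀ (c f : PySem.Dict Int Int), ((PySem.List.enumerate nums 0).foldl
        (fun (s : PySem.Dict Int Int × PySem.Dict Int Int) (p : Int × Int) =>
          if s.1.contains p.2 = false then (s.1.insert p.2 1, s.2.insert p.2 p.1)
          else (s.1.modify p.2 0 (· + 1), s.2)) (c, f)).1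
        = nums.foldl (fun d x => d.modify x 0 (· + 1)) c := by
      intro c f; rw [fstA, PySem.List.map_snd_enumerate]
    have hctr : PySem.Dict.counter nums
        = nums.foldl (fun (d : PySem.Dict Int Int) x => d.modify x 0 (· + 1)) PySem.Dict.empty :=
      PySem.Dict.counter_eq_foldl nums
    obtain ⟨hkeys, hpair⟩ := sndA_inv nums 0 PySem.Dict.empty PySem.Dict.empty rfl
      (by simp [PySem.Dict.empty, PySem.Dict.keys]) (by simp [PySem.Dict.empty])
      (by simp [PySem.Dict.empty])
    rw [hfst, ← hctr] at hkeys
    rw [hfst, ← hctr, hB, pass2]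
    set fo := ((PySem.List.enumerate nums 0).foldl
        (fun (s : PySem.Dict Int Int × PySem.Dict Int Int) (p : Int × Int) =>
          if s.1.contains p.2 = false then (s.1.insert p.2 1, s.2.insert p.2 p.1)
          else (s.1.modify p.2 0 (· + 1), s.2)) (PySem.Dict.empty, PySem.Dict.empty)).2 with hfo
    set m := (PySem.List.max? (PySem.Dict.counter nums).values (fun v => v)).getD 0 with hm
    have hnodup : fo.keys.Nodup := by rw [← hkeys]; exact PySem.Dict.nodup_keys_counter nums
    have hsub : (((PySem.Dict.counter nums).items.filter (fun p => p.2 == m)).map (·.1)).Sublist fo.keys := by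
      rw [← hkeys]
      have h1 : ((PySem.Dict.counter nums).items.filter (fun p => p.2 == m)).Sublist
          (PySem.Dict.counter nums).items := List.filter_sublist
      simpa [PySem.Dict.keys] using List.Sublist.map (fun p : Int × Int => p.1) h1
    rw [PySem.List.sorted_eq_of_perm_of_pairwise_lt _ _ _ (List.Perm.refl _)
      (pairwise_getD_of_sublist fo hnodup hpair _ hsub)]
    rw [PySem.Dict.items_counter, List.filter_map, List.map_map]
    simp only [PySem.Set.empty, List.length_nil, List.drop_zero, List.nil_append]
    rw [← PySem.Set.ofList_eq_foldl]
    have hfc2 : (PySem.Set.ofList nums).filter (fun k => (PySem.Dict.counter nums).getD k 0 == m)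
        = (PySem.Set.ofList nums).filter (fun k => ((nums.count k : Int) == m)) :=
      List.filter_congr (fun k _ => by rw [PySem.Dict.getD_counter])
    rw [hfc2]
    simp [Function.comp_def]
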